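-- pv_equiv track=rewrite | github.com/terminus-labs-ai/sr2 | src/sr2/memory/extraction.py | _find_last_json_array
-- ===== SOURCE A (Python) =====
-- def _find_last_json_array(text: str) -> str | None:
--     """Find the last balanced JSON array in text by bracket matching.
--
--     LLMs typically place JSON output at the end of their response,
--     after any commentary. Searching from the end avoids picking up
--     quoted array literals (e.g. "[]") embedded in commentary text.
--     """
--     end = text.rfind("]")
--     if end == -1:
--         return None
--     depth = 0
--     for i in range(end, -1, -1):
--         if text[i] == "]":
--             depth += 1
--         elif text[i] == "[":
--             depth -= 1
--         if depth == 0: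
--             return text[i : end + 1]
--     return None
-- ===== SOURCE B (Python) =====
-- def _find_last_json_array(text: str) -> str | None:
--     """Find the last balanced JSON array in text by forward stack-based bracket matching."""
--     end = text.rfind("]")
--     if end == -1:
--         return None
--     stack = []
--     for i, ch in enumerate(text[:end]):
--         if ch == "[":
--             stack.append(i)
--         elif ch == "]" and stack:
--             stack.pop()
--     if not stack:
--         return None
--     return text[stack[-1] : end + 1]
-- ===== Notes on version B (the rewrite author's own statement) =====
-- stated objective: alternative
-- what changed: Replaces A's backward depth-counting scan from the last ']' with a single forward pass that maintains a stack of unmatched '[' positions over text[:end] and slices from the stack top.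
import Mathlib
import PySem

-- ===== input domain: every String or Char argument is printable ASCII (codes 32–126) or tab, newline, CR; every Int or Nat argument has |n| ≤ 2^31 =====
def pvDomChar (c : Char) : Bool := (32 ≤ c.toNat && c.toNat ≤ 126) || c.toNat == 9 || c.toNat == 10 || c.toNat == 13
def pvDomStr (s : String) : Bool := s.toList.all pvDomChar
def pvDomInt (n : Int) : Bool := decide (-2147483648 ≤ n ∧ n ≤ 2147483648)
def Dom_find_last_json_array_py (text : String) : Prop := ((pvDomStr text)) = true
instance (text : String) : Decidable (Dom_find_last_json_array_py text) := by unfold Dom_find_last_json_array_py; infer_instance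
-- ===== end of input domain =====

-- B replaces A's backward depth-counting scan with a forward stack-based bracket matcher (same O(n) cost, different traversal).

-- ===== PORT A =====
-- A's 'for i in range(end, -1, -1)' with early return, as structural recursion on i;
-- text[i] is in range on every call (0 ≤ i ≤ end < len(text)), so getD is exact there.
def pvLoopA (cs : List Char) (endIdx : Nat) : Nat → Int → Option (List Char)
  | i, depth =>
    let c := cs.getD i ' '
    let depth' := if c = ']' then depth + 1 else if c = '[' then depth - 1 else depth
    if depth' = 0 then
      some (PySem.Chars.slice cs (some (i : Int)) (some ((endIdx : Int) + 1)))
    else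
      match i with
      | 0 => none
      | i' + 1 => pvLoopA cs endIdx i' depth'

def find_last_json_array_py (text : String) : Option String :=
  let e := PySem.Str.rfind text "]"
  if e = -1 then none
  else (pvLoopA text.toList e.toNat e.toNat 0).map String.ofList

-- ===== PORT B =====
-- one forward step of B's loop over enumerate(text[:end]): push '[' positions, pop on ']' if nonempty
def pvStepB (s : List Int) (p : Int × Char) : List Int :=
  if p.2 = '[' then s ++ [p.1]
  else if p.2 = ']' && !s.isEmpty then s.dropLast
  else s

def find_last_json_array_py_alt (text : String) : Option String :=
  let e := PySem.Str.rfind text "]"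
  if e = -1 then none
  else
    let cs := text.toList
    let stack := (PySem.List.enumerate (PySem.Chars.slice cs none (some e))).foldl pvStepB []
    match stack.getLast? with
    | none => none
    | some m => some (String.ofList (PySem.Chars.slice cs (some m) (some (e + 1))))

-- ===== PRECONDITION & SPEC =====
def Spec_find_last_json_array_py (text : String) (out : Option String) : Prop := out = find_last_json_array_py_alt text
instance (text : String) (out : Option String) : Decidable (Spec_find_last_json_array_py text out) := by unfold Spec_find_last_json_array_py; infer_instance

-- ===== CLAIM (what is proved, stated in full; the proofs are below) =====
def Claim_equal_find_last_json_array_py : Prop := ∀ (text : String), Dom_find_last_json_array_py text → Spec_find_last_json_array_py text (find_last_json_array_py text)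

-- ===== LEMMAS AND PROOFS =====

-- cons-based mirror of B's append-based stack, used only by the proofs
def pvStepC (s : List Int) (p : Int × Char) : List Int :=
  if p.2 = '[' then p.1 :: s else if p.2 = ']' then s.tail else s

lemma pv_app_eq_cons_rev (zs : List (Int × Char)) :
    ∀ s : List Int, zs.foldl pvStepB s.reverse = (zs.foldl pvStepC s).reverse := by
  induction zs with
  | nil => intro s; rfl
  | cons p zs ih =>
    intro s
    have hstep : pvStepB s.reverse p = (pvStepC s p).reverse := by
      by_cases h1 : p.2 = '['
      · simp [pvStepB, pvStepC, h1]
      · by_cases h2 : p.2 = ']'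
        · cases s with
          | nil => simp [pvStepB, pvStepC, h2]
          | cons a t => simp [pvStepB, pvStepC, h2]
        · simp [pvStepB, pvStepC, h1, h2]
    simpa [List.foldl_cons, hstep] using ih (pvStepC s p)

lemma pv_prefix_bracket {l : List Char} (h : List.isPrefixOf [']'] l = true) :
    l.head? = some ']' := by
  cases l with
  | nil => simp [List.isPrefixOf] at h
  | cons a t =>
    simp [List.isPrefixOf] at h
    simp [h.symm]

lemma pv_rfind_go_spec (cs : List Char) :
    ∀ k : Nat, PySem.Chars.rfind.go cs [']'] k = -1 ∨
      ∃ j : Nat, PySem.Chars.rfind.go cs [']'] k = (j : Int) ∧ j < cs.length ∧ cs.getD j ' ' = ']' := by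
  intro k
  induction k with
  | zero =>
    by_cases h : List.isPrefixOf [']'] cs = true
    · right
      refine ⟨0, ?_, ?_, ?_⟩
      · simp [PySem.Chars.rfind.go, h]
      · cases cs with
        | nil => simp [List.isPrefixOf] at h
        | cons a t => simp
      · have := pv_prefix_bracket h
        cases cs with
        | nil => simp at this
        | cons a t => simp_all
    · left; simp [PySem.Chars.rfind.go, h]
  | succ j ih =>
    by_cases h : List.isPrefixOf [']'] (cs.drop (j+1)) = true
    · right
      have hhd : (cs.drop (j+1)).head? = some ']' := pv_prefix_bracket h
      have hget : cs[j+1]? = some ']' := by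
        rw [← List.head?_drop]; exact hhd
      refine ⟨j+1, ?_, ?_, ?_⟩
      · simp [PySem.Chars.rfind.go, h]
      · exact (List.getElem?_eq_some_iff.mp hget).1
      · simp [List.getD_eq_getElem?_getD, hget]
    · have : PySem.Chars.rfind.go cs [']'] (j+1) = PySem.Chars.rfind.go cs [']'] j := by
        simp [PySem.Chars.rfind.go, h]
      rw [this]; exact ih

lemma pv_rfind_spec (cs : List Char) :
    PySem.Chars.rfind cs [']'] = -1 ∨
      ∃ j : Nat, PySem.Chars.rfind cs [']'] = (j : Int) ∧ j < cs.length ∧ cs.getD j ' ' = ']' := by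
  exact pv_rfind_go_spec cs cs.length

lemma pv_enumerate_append {α : Type} (l : List α) (a : α) :
    ∀ k : Int, PySem.List.enumerate (l ++ [a]) k
      = PySem.List.enumerate l k ++ [(k + l.length, a)] := by
  induction l with
  | nil => intro k; simp [PySem.List.enumerate]
  | cons x t ih =>
    intro k
    simp only [List.cons_append, PySem.List.enumerate, ih (k+1), List.length_cons,
      show k + 1 + (t.length : Int) = k + ((t.length + 1 : Nat) : Int) from by push_cast; ring]

lemma pvLoopA_eq_stack (cs : List Char) (endIdx : Nat) :
    ∀ (i : Nat), i < cs.length → ∀ d : Int, 1 ≤ d →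
      pvLoopA cs endIdx i d =
        ((((PySem.List.enumerate (cs.take (i+1))).foldl pvStepC []).drop (d-1).toNat).head?).map
          (fun m => PySem.Chars.slice cs (some m) (some ((endIdx : Int) + 1))) := by
  intro i
  induction i with
  | zero =>
    intro h d hd
    have hc : cs.take 1 = [cs.getD 0 ' '] := by
      rw [List.take_add_one, List.take_zero, List.getD_eq_getElem?_getD,
        List.getElem?_eq_getElem h]
      rfl
    rw [pvLoopA, hc]
    set c := cs.getD 0 ' ' with hcdef
    by_cases h1 : c = ']'
    · simp [h1, PySem.List.enumerate, pvStepC, show d + 1 ≠ 0 by omega]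
    · by_cases h2 : c = '['
      · by_cases hd1 : d = 1
        · simp [h2, hd1, PySem.List.enumerate, pvStepC]
        · have hge : 1 ≤ (d - 1).toNat := by omega
          have hdrop : ([(0 : Int)].drop (d-1).toNat) = [] := by
            cases hk : (d-1).toNat with
            | zero => omega
            | succ k => simp
          simp [h2, PySem.List.enumerate, pvStepC, show d - 1 ≠ 0 by omega,
            show ¬ (d.toNat - 1 = 0) by omega]
      · simp [h1, h2, PySem.List.enumerate, pvStepC, show d ≠ 0 by omega]
  | succ i' ih =>
    intro h d hd
    have hlt : i' < cs.length := by omega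
    have hc : cs.take (i'+1+1) = cs.take (i'+1) ++ [cs.getD (i'+1) ' '] := by
      rw [List.take_add_one, List.getD_eq_getElem?_getD, List.getElem?_eq_getElem h]
      rfl
    have henum : PySem.List.enumerate (cs.take (i'+1+1))
        = PySem.List.enumerate (cs.take (i'+1)) ++ [(((i'+1 : Nat) : Int), cs.getD (i'+1) ' ')] := by
      rw [hc, pv_enumerate_append]
      congr 2
      simp [List.length_take, Nat.min_eq_left (Nat.succ_le_of_lt hlt)]
    rw [pvLoopA, henum, List.foldl_append]
    set c := cs.getD (i'+1) ' ' with hcdef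
    set S := (PySem.List.enumerate (cs.take (i'+1))).foldl pvStepC [] with hS
    by_cases h1 : c = ']'
    · have hrec := ih hlt (d+1) (by omega)
      have hdrop : S.tail.drop (d-1).toNat = S.drop (d+1-1).toNat := by
        rw [List.drop_tail]
        congr 1
        omega
      simp only [h1, List.foldl_cons, List.foldl_nil, pvStepC,
        if_neg (by decide : ¬ (']' = '[')), if_true, if_neg (show ¬ d + 1 = 0 by omega)]
      rw [hrec, hdrop]
    · by_cases h2 : c = '['
      · by_cases hd1 : d = 1
        · simp [h2, hd1, pvStepC]
        · have hrec := ih hlt (d-1) (by omega)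
          obtain ⟨k, hk⟩ : ∃ k, (d-1).toNat = k + 1 := ⟨(d-2).toNat, by omega⟩
          have hdrop : (((i'+1 : Nat) : Int) :: S).drop (d-1).toNat = S.drop (d-1-1).toNat := by
            rw [hk, List.drop_succ_cons]
            congr 1
            omega
          simp only [h2, List.foldl_cons, List.foldl_nil, pvStepC,
            if_neg (show ¬ ('[' = ']') by decide), if_true,
            if_neg (show ¬ d - 1 = 0 by omega)]
          rw [hrec, hdrop]
      · have hrec := ih hlt d hd
        simp [h1, h2, pvStepC, show d ≠ 0 by omega, hrec]

lemma pv_main (text : String) :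
    find_last_json_array_py text = find_last_json_array_py_alt text := by
  unfold find_last_json_array_py find_last_json_array_py_alt
  have htl : ("]" : String).toList = [']'] := rfl
  simp only [PySem.Str.rfind_eq, htl]
  rcases pv_rfind_spec text.toList with h | ⟨j, hj, hjlt, hjc⟩
  · simp [h]
  · rw [hj]
    simp only [if_neg (show ¬ ((j : Int)) = -1 by omega), Int.toNat_natCast]
    have hslice : PySem.Chars.slice text.toList none (some (j : Int)) = text.toList.take j :=
      PySem.List.slice_to_natCast text.toList j
    have happ := pv_app_eq_cons_rev (PySem.List.enumerate (text.toList.take j)) []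
    simp only [List.reverse_nil] at happ
    rw [hslice, happ, List.getLast?_reverse]
    rw [List.getD_eq_getElem?_getD] at hjc
    set S := (PySem.List.enumerate (text.toList.take j)).foldl pvStepC [] with hS
    have hA : pvLoopA text.toList j j 0 =
        (S.head?).map (fun m => PySem.Chars.slice text.toList (some m) (some ((j : Int) + 1))) := by
      cases j with
      | zero =>
        rw [pvLoopA]
        simp [hjc, hS]
      | succ j' =>
        rw [pvLoopA]
        have hst := pvLoopA_eq_stack text.toList (j'+1) j' (by omega) 1 (by omega)
        simp [hjc, hst, hS]
    rw [hA]
    cases hH : S.head? with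
    | none => simp
    | some m => simp

-- ===== VERDICT (by name: the statement is the Claim_ definition above) =====
theorem find_last_json_array_py_spec : Claim_equal_find_last_json_array_py := by
  intro text _
  exact pv_main text
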